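-- pv_equiv track=rewrite | github.com/markbirds/Simple-Networking-Program | NetworkProgram.py | subnetBinary
-- ===== SOURCE A (Python) =====
-- def subnetBinary(prefix): #function for computing subnet mask in binary based on prefix
--     subnet = ''
--     for i in range(32):
--         if i%8 == 0 and i != 0: subnet+='.'
--         if prefix > 0: subnet+='1'
--         else: subnet+='0'
--         prefix-=1
--     return subnet
-- ===== SOURCE B (Python) =====
-- def subnetBinary(prefix):
--     n = max(0, min(32, prefix))
--     s = '1' * n + '0' * (32 - n)
--     return '.'.join(s[i:i + 8] for i in range(0, 32, 8))
-- ===== Notes on version B (the rewrite author's own statement) =====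
-- stated objective: simpler
-- what changed: Replaces the per-bit loop with in-loop dot insertion and prefix decrementing by a closed-form clamp of the prefix to [0,32], building the mask as '1'*n+'0'*(32-n) and joining the four octet slices with dots.
import Mathlib
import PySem

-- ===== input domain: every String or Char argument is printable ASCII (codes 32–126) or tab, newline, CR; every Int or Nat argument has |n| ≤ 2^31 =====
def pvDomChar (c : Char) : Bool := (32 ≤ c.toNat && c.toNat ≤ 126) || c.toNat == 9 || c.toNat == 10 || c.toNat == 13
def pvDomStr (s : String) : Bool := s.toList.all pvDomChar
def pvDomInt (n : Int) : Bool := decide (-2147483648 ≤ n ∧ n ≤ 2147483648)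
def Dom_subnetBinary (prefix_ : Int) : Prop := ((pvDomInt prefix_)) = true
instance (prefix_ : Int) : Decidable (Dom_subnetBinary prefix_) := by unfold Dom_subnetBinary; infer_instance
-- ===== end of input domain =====

-- B replaces A's per-bit loop (dot insertion + decrementing prefix) by a closed-form
-- clamp of the prefix to [0,32] and a slice-and-join octet build; objective: simpler.

-- ===== PORT A =====
-- the for-loop over range(32) with state (subnet, prefix)
def subnetBinaryLoop : List Int → List Char → Int → List Char
  | [], subnet, _ => subnet
  | i :: is, subnet, p =>
    let subnet := if i % 8 == 0 && i != 0 then subnet ++ ['.'] else subnet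
    let subnet := if p > 0 then subnet ++ ['1'] else subnet ++ ['0']
    subnetBinaryLoop is subnet (p - 1)

def subnetBinary (prefix_ : Int) : String :=
  String.ofList (subnetBinaryLoop (PySem.List.pyRange 0 32 1) [] prefix_)

-- ===== PORT B =====
def subnetBinary_alt (prefix_ : Int) : String :=
  let n : Int := max 0 (min 32 prefix_)
  let s : String := String.ofList (List.replicate n.toNat '1' ++ List.replicate (32 - n).toNat '0')
  PySem.Str.join "." ((PySem.List.pyRange 0 32 8).map (fun i => PySem.Str.slice s (some i) (some (i + 8))))

-- ===== PRECONDITION & SPEC =====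
def Spec_subnetBinary (prefix_ : Int) (out : String) : Prop := out = subnetBinary_alt prefix_
instance (prefix_ : Int) (out : String) : Decidable (Spec_subnetBinary prefix_ out) := by unfold Spec_subnetBinary; infer_instance

-- ===== CLAIM (what is proved, stated in full; the proofs are below) =====
def Claim_equal_subnetBinary : Prop := ∀ (prefix_ : Int), Dom_subnetBinary prefix_ → Spec_subnetBinary prefix_ (subnetBinary prefix_)

-- ===== LEMMAS AND PROOFS =====

-- A's loop appends '0' at every step once the running prefix is ≤ 0
theorem loop_nonpos (l : List Int) (s : List Char) (p q : Int) (hp : p ≤ 0) (hq : q ≤ 0) :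
    subnetBinaryLoop l s p = subnetBinaryLoop l s q := by
  induction l generalizing s p q with
  | nil => rfl
  | cons i is ih =>
    simp only [subnetBinaryLoop]
    rw [if_neg (by omega : ¬ p > 0), if_neg (by omega : ¬ q > 0)]
    exact ih _ _ _ (by omega) (by omega)

-- A's loop appends '1' at every step while the running prefix exceeds the remaining length
theorem loop_ge_len (l : List Int) (s : List Char) (p q : Int)
    (hp : (l.length : Int) ≤ p) (hq : (l.length : Int) ≤ q) :
    subnetBinaryLoop l s p = subnetBinaryLoop l s q := by
  induction l generalizing s p q with
  | nil => rfl
  | cons i is ih =>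
    simp only [subnetBinaryLoop]
    simp only [List.length_cons] at hp hq
    rw [if_pos (by push_cast at hp; omega : p > 0), if_pos (by push_cast at hq; omega : q > 0)]
    exact ih _ _ _ (by push_cast at hp ⊢; omega) (by push_cast at hq ⊢; omega)

-- A's result depends on the prefix only through its clamp to [0, 32]
theorem subnetBinary_clamp (p : Int) :
    subnetBinary p = subnetBinary (max 0 (min 32 p)) := by
  unfold subnetBinary
  rcases le_or_gt p 0 with h | h
  · rw [loop_nonpos _ _ p (max 0 (min 32 p)) h (by omega)]
  · rcases le_or_gt 32 p with h32 | h32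
    · have hlen : ((PySem.List.pyRange 0 32 1).length : Int) = 32 := by decide
      rw [loop_ge_len _ _ p (max 0 (min 32 p)) (by omega) (by omega)]
    · have : max 0 (min 32 p) = p := by omega
      rw [this]

-- B's result likewise depends on the prefix only through its clamp
theorem subnetBinary_alt_clamp (p : Int) :
    subnetBinary_alt p = subnetBinary_alt (max 0 (min 32 p)) := by
  unfold subnetBinary_alt
  have : max 0 (min 32 (max 0 (min 32 p))) = max 0 (min 32 p) := by omega
  rw [this]

-- ===== VERDICT (by name: the statement is the Claim_ definition above) =====
theorem subnetBinary_spec : Claim_equal_subnetBinary := by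
  intro p _
  unfold Spec_subnetBinary
  rw [subnetBinary_clamp, subnetBinary_alt_clamp]
  have h0 : 0 ≤ max 0 (min 32 p) := by omega
  have h32 : max 0 (min 32 p) ≤ 32 := by omega
  set c := max 0 (min 32 p) with hc
  clear_value c
  interval_cases c <;> decide
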